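-- pv_equiv track=rewrite | github.com/cepdnaclk/e18-4yp-Software-Package-To-Support-Agent-Based-Modelling-Based-Decision-Making | visualizing tool/triangular_mesh_package/neighbour.py | find_point_neighbors
-- ===== SOURCE A (Python) =====
-- def find_point_neighbors(triangles):
--     point_to_triangles = {}
--
--     # Step 1: Populate point_to_triangles dictionary
--     for i, triangle in enumerate(triangles):
--         for point in triangle:
--             point_tuple = tuple(point)
--             if point_tuple not in point_to_triangles:
--                 point_to_triangles[point_tuple] = set()
--             point_to_triangles[point_tuple].add(i)
--
--     # Step 2: Determine neighbors for each point
--     point_neighbors = {}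
--
--     for point_tuple, triangle_set in point_to_triangles.items():
--         neighbors = set()
--         for triangle_index in triangle_set:
--             for other_point in triangles[triangle_index]:
--                 if tuple(other_point) != point_tuple:
--                     neighbors.add(tuple(other_point))
--         point_neighbors[point_tuple] = neighbors
--
--     return point_neighbors
-- ===== SOURCE B (Python) =====
-- def find_point_neighbors(triangles):
--     # Single pass over triangles: record each edge directly, no incidence index.
--     point_neighbors = {}
--     for triangle in triangles:
--         pts = [tuple(p) for p in triangle]
--         for a in pts:
--             nbrs = point_neighbors.setdefault(a, set())
--             for b in pts:
--                 if b != a: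
--                     nbrs.add(b)
--     return point_neighbors
-- ===== Notes on version B (the rewrite author's own statement) =====
-- stated objective: simpler
-- what changed: Drops the point-to-triangles incidence map entirely: one pass over triangles adds, for each point of a triangle, the other points of that triangle directly into its neighbor set (setdefault), instead of first indexing points to triangles and then rescanning the indexed triangles.
import Mathlib
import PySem

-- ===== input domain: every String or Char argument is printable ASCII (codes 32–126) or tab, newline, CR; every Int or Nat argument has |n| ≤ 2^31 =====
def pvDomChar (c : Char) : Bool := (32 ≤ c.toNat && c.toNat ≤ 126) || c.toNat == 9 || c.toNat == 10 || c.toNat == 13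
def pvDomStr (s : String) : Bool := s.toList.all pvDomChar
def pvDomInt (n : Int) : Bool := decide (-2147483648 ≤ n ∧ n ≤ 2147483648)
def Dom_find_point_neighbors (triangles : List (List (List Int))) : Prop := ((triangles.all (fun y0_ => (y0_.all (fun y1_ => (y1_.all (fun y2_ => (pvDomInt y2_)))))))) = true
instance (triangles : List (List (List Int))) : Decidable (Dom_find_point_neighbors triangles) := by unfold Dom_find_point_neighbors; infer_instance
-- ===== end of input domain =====

-- B builds the neighbor sets directly in one pass over the triangles (setdefault + add),
-- dropping A's point-to-triangles incidence map and its indexed rescan; same result, simpler.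

-- ===== PORT A =====
-- Step 2's triangles[triangle_index] is always in range (indices come from enumerate),
-- so pyGetD with dummy default [] is exact here.
def find_point_neighbors (triangles : List (List (List Int))) : List (List Int × List (List Int)) :=
  let point_to_triangles : PySem.Dict (List Int) (PySem.Set Int) :=
    (PySem.List.enumerate triangles).foldl
      (fun d it =>
        it.2.foldl
          (fun d point =>
            (if d.contains point = false then d.insert point PySem.Set.empty else d).modify
              point PySem.Set.empty (fun s => PySem.Set.add s it.1))
          d)
      PySem.Dict.empty
  let point_neighbors : PySem.Dict (List Int) (PySem.Set (List Int)) :=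
    point_to_triangles.items.foldl
      (fun pn pr =>
        pn.insert pr.1
          (pr.2.foldl
            (fun ns ti =>
              (PySem.List.pyGetD triangles ti []).foldl
                (fun ns op => if op ≠ pr.1 then PySem.Set.add ns op else ns)
                ns)
            PySem.Set.empty))
      PySem.Dict.empty
  point_neighbors.items

-- ===== PORT B =====
def pvAddTriangle (pn : PySem.Dict (List Int) (PySem.Set (List Int))) (triangle : List (List Int)) :
    PySem.Dict (List Int) (PySem.Set (List Int)) :=
  triangle.foldl
    (fun pn a =>
      triangle.foldl
        (fun pn b => if b ≠ a then pn.modify a PySem.Set.empty (fun s => PySem.Set.add s b) else pn)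
        (pn.setdefault a PySem.Set.empty))
    pn

def find_point_neighbors_alt (triangles : List (List (List Int))) : List (List Int × List (List Int)) :=
  (triangles.foldl pvAddTriangle PySem.Dict.empty).items

-- ===== PRECONDITION & SPEC =====
def Spec_find_point_neighbors (triangles : List (List (List Int))) (out : List (List Int × List (List Int))) : Prop := out = find_point_neighbors_alt triangles
instance (triangles : List (List (List Int))) (out : List (List Int × List (List Int))) : Decidable (Spec_find_point_neighbors triangles out) := by unfold Spec_find_point_neighbors; infer_instance

-- ===== CLAIM (what is proved, stated in full; the proofs are below) =====
def Claim_equal_find_point_neighbors : Prop := ∀ (triangles : List (List (List Int))), Dom_find_point_neighbors triangles → Spec_find_point_neighbors triangles (find_point_neighbors triangles)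

-- ===== LEMMAS AND PROOFS =====

-- the common shape both ports compute: points in first-appearance order, each paired with
-- the dedup (in first-appearance order) of the other points of the triangles containing it
def pvNbrList (p : List Int) (triangles : List (List (List Int))) : List (List Int) :=
  (triangles.filter (fun tri => decide (p ∈ tri))).flatMap (fun tri => tri.filter (fun q => decide (q ≠ p)))

def pvModel (triangles : List (List (List Int))) : List (List Int × List (List Int)) :=
  (PySem.Set.ofList triangles.flatten).map (fun p => (p, PySem.Set.ofList (pvNbrList p triangles)))

-- generic Set facts specific to the folds of these two programs
theorem pvAdd_eq_self_of_mem {α : Type} [BEq α] [LawfulBEq α] (s : PySem.Set α) (x : α)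
    (h : x ∈ s) : PySem.Set.add s x = s := by
  simp [PySem.Set.add, h]

theorem pvUpdate_eq_self_of_subset {α : Type} [BEq α] [LawfulBEq α] (l : List α) (s : PySem.Set α)
    (h : ∀ y ∈ l, y ∈ s) : PySem.Set.update s l = s := by
  induction l generalizing s with
  | nil => rfl
  | cons x t ih =>
      rw [PySem.Set.update_cons, pvAdd_eq_self_of_mem s x (h x (by simp))]
      exact ih s (fun y hy => h y (by simp [hy]))

theorem pvUpdate_idem {α : Type} [BEq α] [LawfulBEq α] (s : PySem.Set α) (l : List α) :
    PySem.Set.update (PySem.Set.update s l) l = PySem.Set.update s l := by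
  exact pvUpdate_eq_self_of_subset l _ (fun y hy => (PySem.Set.mem_update s l y).2 (Or.inr hy))

theorem pvFoldl_update_flatMap {α β : Type} [BEq β] [LawfulBEq β] (l : List α) (g : α → List β)
    (s : PySem.Set β) :
    l.foldl (fun s x => PySem.Set.update s (g x)) s = PySem.Set.update s (l.flatMap g) := by
  induction l generalizing s with
  | nil => rfl
  | cons x t ih => rw [List.foldl_cons, List.flatMap_cons, PySem.Set.update_append, ih]

-- ===== A-side =====
theorem pvA_if_modify (d : PySem.Dict (List Int) (PySem.Set Int)) (pt : List Int)
    (f : PySem.Set Int → PySem.Set Int) :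
    (if d.contains pt = false then d.insert pt PySem.Set.empty else d).modify pt PySem.Set.empty f
      = d.modify pt PySem.Set.empty f := by
  cases h : d.contains pt with
  | true => simp
  | false =>
      rw [if_pos (c := (false = false)) rfl]
      simp only [PySem.Dict.modify, PySem.Dict.getD_insert_self,
        PySem.Dict.insert_insert_self, PySem.Dict.getD_of_not_contains d _ h]

theorem pvA_step_val (p : List Int) (i : Int) (tri : List (List Int))
    (d : PySem.Dict (List Int) (PySem.Set Int)) :
    (tri.foldl (fun d pt => d.modify pt PySem.Set.empty (fun s => PySem.Set.add s i)) d).getD p PySem.Set.empty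
      = if p ∈ tri then PySem.Set.add (d.getD p PySem.Set.empty) i else d.getD p PySem.Set.empty := by
  induction tri generalizing d with
  | nil => simp
  | cons q t ih =>
      rw [List.foldl_cons, ih]
      by_cases hq : p = q
      · subst hq
        rw [PySem.Dict.getD_modify_self]
        by_cases hp : p ∈ t <;> simp [hp]
      · rw [PySem.Dict.getD_modify_of_ne d _ _ hq]
        by_cases hp : p ∈ t <;> simp [hp, hq]

theorem pvA_inc_val (p : List Int) (l : List (Int × List (List Int)))
    (d : PySem.Dict (List Int) (PySem.Set Int)) :
    (l.foldl (fun d it => it.2.foldl (fun d pt => d.modify pt PySem.Set.empty (fun s => PySem.Set.add s it.1)) d) d).getD p PySem.Set.empty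
      = PySem.Set.update (d.getD p PySem.Set.empty)
          ((l.filter (fun it => decide (p ∈ it.2))).map (·.1)) := by
  induction l generalizing d with
  | nil => rfl
  | cons it t ih =>
      rw [List.foldl_cons, ih, pvA_step_val]
      by_cases hp : p ∈ it.2
      · simp [hp, PySem.Set.update_cons]
      · simp [hp]

theorem pvA_inc_keys (l : List (Int × List (List Int)))
    (d : PySem.Dict (List Int) (PySem.Set Int)) :
    (l.foldl (fun d it => it.2.foldl (fun d pt => d.modify pt PySem.Set.empty (fun s => PySem.Set.add s it.1)) d) d).keys
      = PySem.Set.update d.keys (l.map (·.2)).flatten := by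
  induction l generalizing d with
  | nil => rfl
  | cons it t ih =>
      rw [List.foldl_cons, ih,
        PySem.Dict.keys_foldl_modify it.2 PySem.Set.empty (fun _ _ s => PySem.Set.add s it.1) d,
        List.map_cons, List.flatten_cons, PySem.Set.update_append]

theorem pvA_inner_nbr (p : List Int) (tri : List (List Int)) (ns : PySem.Set (List Int)) :
    tri.foldl (fun ns op => if op ≠ p then PySem.Set.add ns op else ns) ns
      = PySem.Set.update ns (tri.filter (fun q => decide (q ≠ p))) := by
  rw [PySem.List.foldl_ite_eq_foldl_filter (fun op => op ≠ p) PySem.Set.add tri ns]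
  rfl

theorem pvA_filter_enum_snd (p : List Int) (ts : List (List (List Int))) (s : Int) :
    ((PySem.List.enumerate ts s).filter (fun it => decide (p ∈ it.2))).map (·.2)
      = ts.filter (fun tri => decide (p ∈ tri)) := by
  induction ts generalizing s with
  | nil => simp [PySem.List.enumerate_nil]
  | cons tri t ih =>
      rw [PySem.List.enumerate_cons]
      by_cases hp : p ∈ tri
      · simp [hp, ih]
      · simp [hp, ih]

theorem pvA_eq_model (ts : List (List (List Int))) : find_point_neighbors ts = pvModel ts := by
  unfold find_point_neighbors
  simp only []
  -- normalize step 1: the membership test + modify is just modify with default ∅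
  rw [PySem.List.foldl_congr_mem (PySem.List.enumerate ts)
    (fun d it => it.2.foldl
      (fun d point =>
        (if d.contains point = false then d.insert point PySem.Set.empty else d).modify
          point PySem.Set.empty (fun s => PySem.Set.add s it.1)) d)
    (fun d it => it.2.foldl
      (fun d point => d.modify point PySem.Set.empty (fun s => PySem.Set.add s it.1)) d)
    PySem.Dict.empty
    (fun acc it _ => PySem.List.foldl_congr_mem it.2 _ _ acc
      (fun acc2 pt _ => pvA_if_modify acc2 pt _))]
  set P := (PySem.List.enumerate ts).foldl
      (fun d it => it.2.foldl
        (fun d pt => d.modify pt PySem.Set.empty (fun s => PySem.Set.add s it.1)) d)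
      PySem.Dict.empty with hP
  have hkeys : P.keys = PySem.Set.ofList ts.flatten := by
    rw [hP, pvA_inc_keys, PySem.Dict.keys_empty, PySem.List.map_snd_enumerate]
    exact PySem.Set.update_empty _
  have hknd : P.keys.Nodup := by rw [hkeys]; exact PySem.Set.nodup_ofList _
  have hndE : ∀ p : List Int,
      (((PySem.List.enumerate ts).filter (fun it => decide (p ∈ it.2))).map (·.1)).Nodup := by
    intro p
    have h1 := (PySem.List.pairwise_lt_enumerate ts 0).filter (fun it => decide (p ∈ it.2))
    have h2 := List.Pairwise.map (S := ((· < ·) : Int → Int → Prop))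
      (fun it : Int × List (List Int) => it.1) (fun a b h => h) h1
    exact h2.imp (fun {a b} h => Int.ne_of_lt h)
  have hval : ∀ p : List Int, P.getD p PySem.Set.empty
      = ((PySem.List.enumerate ts).filter (fun it => decide (p ∈ it.2))).map (·.1) := by
    intro p
    rw [hP, pvA_inc_val, PySem.Dict.getD_empty]
    exact (PySem.Set.update_empty _).trans (PySem.Set.ofList_eq_self_of_nodup _ (hndE p))
  -- step 2 is a fold of fresh inserts over the items of P
  rw [PySem.Dict.items_foldl_insert_fresh P.items (·.1)
    (fun pr => pr.2.foldl
      (fun ns ti => (PySem.List.pyGetD ts ti []).foldl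
        (fun ns op => if op ≠ pr.1 then PySem.Set.add ns op else ns) ns)
      PySem.Set.empty)
    PySem.Dict.empty
    (fun pr _ => PySem.Dict.contains_empty pr.1)
    (by simpa only [PySem.Dict.keys] using hknd)]
  rw [PySem.Dict.items_eq_map_keys P hknd PySem.Set.empty, List.map_map]
  rw [hkeys]
  unfold pvModel
  have hie : (PySem.Dict.empty : PySem.Dict (List Int) (PySem.Set (List Int))).items = [] := rfl
  rw [hie, List.nil_append]
  apply List.map_congr_left
  intro p hp
  simp only [Function.comp]
  congr 1
  -- the neighbor fold over the incidence list is the model neighbor set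
  rw [hval p, List.foldl_map]
  rw [PySem.List.foldl_congr_mem _ _
    (fun ns it => PySem.Set.update ns (it.2.filter (fun q => decide (q ≠ p))))
    PySem.Set.empty
    (fun acc it hit => by
      have hmem := List.mem_of_mem_filter hit
      rcases (PySem.List.mem_enumerate_iff ts 0 it).1 hmem with ⟨k, hk, hit'⟩
      have h0 : (0 : Int) + (k : Int) = (k : Int) := by omega
      have hg : PySem.List.pyGetD ts it.1 [] = it.2 := by
        rw [hit']
        simp only [h0, PySem.List.pyGetD, PySem.List.pyGet?_natCast,
          List.getElem?_eq_getElem hk, Option.getD_some]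
      rw [hg, pvA_inner_nbr])]
  rw [pvFoldl_update_flatMap, PySem.Set.update_empty]
  unfold pvNbrList
  rw [← pvA_filter_enum_snd p ts 0, List.flatMap_map]

-- ===== B-side =====
theorem pvB_setdefault_getD (pn : PySem.Dict (List Int) (PySem.Set (List Int)))
    (a p : List Int) :
    (pn.setdefault a PySem.Set.empty).getD p PySem.Set.empty = pn.getD p PySem.Set.empty := by
  cases h : pn.contains a with
  | true => rw [PySem.Dict.setdefault_of_contains pn _ h]
  | false =>
      rw [PySem.Dict.setdefault_of_not_contains pn _ h]
      by_cases hpa : p = a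
      · subst hpa
        rw [PySem.Dict.getD_insert_self, PySem.Dict.getD_of_not_contains pn _ h]
      · rw [PySem.Dict.getD_insert_of_ne pn _ _ hpa]

theorem pvB_inner_val_self (a : List Int) (l : List (List Int))
    (pn : PySem.Dict (List Int) (PySem.Set (List Int))) :
    (l.foldl (fun pn b => if b ≠ a then pn.modify a PySem.Set.empty (fun s => PySem.Set.add s b) else pn) pn).getD a PySem.Set.empty
      = PySem.Set.update (pn.getD a PySem.Set.empty) (l.filter (fun b => decide (b ≠ a))) := by
  induction l generalizing pn with
  | nil => rfl
  | cons b t ih =>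
      rw [List.foldl_cons]
      by_cases hb : b = a
      · rw [if_neg (fun h => absurd hb h), ih]
        simp [hb]
      · rw [if_pos hb, ih, PySem.Dict.getD_modify_self]
        simp [hb, PySem.Set.update_cons]

theorem pvB_inner_val_other (a p : List Int) (hpa : p ≠ a) (l : List (List Int))
    (pn : PySem.Dict (List Int) (PySem.Set (List Int))) :
    (l.foldl (fun pn b => if b ≠ a then pn.modify a PySem.Set.empty (fun s => PySem.Set.add s b) else pn) pn).getD p PySem.Set.empty
      = pn.getD p PySem.Set.empty := by
  induction l generalizing pn with
  | nil => rfl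
  | cons b t ih =>
      rw [List.foldl_cons]
      by_cases hb : b = a
      · rw [if_neg (fun h => absurd hb h), ih]
      · rw [if_pos hb, ih, PySem.Dict.getD_modify_of_ne pn _ _ hpa]

theorem pvB_inner_keys (a : List Int) (l : List (List Int))
    (pn : PySem.Dict (List Int) (PySem.Set (List Int))) (ha : pn.contains a = true) :
    (l.foldl (fun pn b => if b ≠ a then pn.modify a PySem.Set.empty (fun s => PySem.Set.add s b) else pn) pn).keys
      = pn.keys := by
  induction l generalizing pn with
  | nil => rfl
  | cons b t ih =>
      rw [List.foldl_cons]
      by_cases hb : b = a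
      · rw [if_neg (fun h => absurd hb h)]
        exact ih pn ha
      · rw [if_pos hb, ih _ (by rw [PySem.Dict.contains_modify]; simp [ha]),
          PySem.Dict.keys_modify, PySem.Dict.keys_insert_of_contains _ _ ha]

theorem pvB_occ_val (p : List Int) (tri : List (List Int)) (l : List (List Int))
    (pn : PySem.Dict (List Int) (PySem.Set (List Int))) :
    (l.foldl (fun pn a =>
        tri.foldl (fun pn b => if b ≠ a then pn.modify a PySem.Set.empty (fun s => PySem.Set.add s b) else pn)
          (pn.setdefault a PySem.Set.empty)) pn).getD p PySem.Set.empty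
      = if p ∈ l then
          PySem.Set.update (pn.getD p PySem.Set.empty) (tri.filter (fun q => decide (q ≠ p)))
        else pn.getD p PySem.Set.empty := by
  induction l generalizing pn with
  | nil => simp
  | cons a t ih =>
      rw [List.foldl_cons, ih]
      by_cases hap : a = p
      · rw [hap, pvB_inner_val_self, pvB_setdefault_getD]
        by_cases hp : p ∈ t
        · simp [hp, pvUpdate_idem]
        · simp [hp]
      · rw [pvB_inner_val_other a p (fun h => absurd h.symm hap), pvB_setdefault_getD]
        have hm : (p ∈ a :: t) ↔ (p ∈ t) := by
          constructor
          · intro h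
            rcases List.mem_cons.1 h with h1 | h1
            · exact absurd h1.symm hap
            · exact h1
          · exact fun h => List.mem_cons_of_mem _ h
        by_cases hp : p ∈ t <;> simp [hp, hm]

theorem pvB_step_keys (tri : List (List Int))
    (pn : PySem.Dict (List Int) (PySem.Set (List Int))) :
    (pvAddTriangle pn tri).keys = PySem.Set.update pn.keys tri := by
  unfold pvAddTriangle
  -- generalize the occurrence list
  suffices h : ∀ (l : List (List Int)) (pn : PySem.Dict (List Int) (PySem.Set (List Int))),
      (l.foldl (fun pn a =>
        tri.foldl (fun pn b => if b ≠ a then pn.modify a PySem.Set.empty (fun s => PySem.Set.add s b) else pn)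
          (pn.setdefault a PySem.Set.empty)) pn).keys = PySem.Set.update pn.keys l by
    exact h tri pn
  intro l
  induction l with
  | nil => intro pn; rfl
  | cons a t ih =>
      intro pn
      rw [List.foldl_cons, ih, pvB_inner_keys a tri _ (by rw [PySem.Dict.contains_setdefault]; simp),
        PySem.Set.update_cons]
      congr 1
      cases h : pn.contains a with
      | true =>
          rw [PySem.Dict.setdefault_of_contains pn _ h,
            pvAdd_eq_self_of_mem _ _ ((PySem.Dict.contains_iff_mem_keys pn a).1 h)]
      | false =>
          rw [PySem.Dict.setdefault_of_not_contains pn _ h,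
            PySem.Dict.keys_insert_of_not_contains pn _ h]
          have hna : a ∉ pn.keys := fun hm => by
            rw [(PySem.Dict.contains_iff_mem_keys pn a).2 hm] at h; exact Bool.noConfusion h
          simp [PySem.Set.add, hna]

theorem pvB_val (p : List Int) (ts : List (List (List Int)))
    (pn : PySem.Dict (List Int) (PySem.Set (List Int))) :
    (ts.foldl pvAddTriangle pn).getD p PySem.Set.empty
      = PySem.Set.update (pn.getD p PySem.Set.empty) (pvNbrList p ts) := by
  induction ts generalizing pn with
  | nil => rfl
  | cons tri t ih =>
      rw [List.foldl_cons, ih]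
      have hstep : (pvAddTriangle pn tri).getD p PySem.Set.empty
          = if p ∈ tri then
              PySem.Set.update (pn.getD p PySem.Set.empty) (tri.filter (fun q => decide (q ≠ p)))
            else pn.getD p PySem.Set.empty := by
        unfold pvAddTriangle
        exact pvB_occ_val p tri tri pn
      rw [hstep]
      unfold pvNbrList
      by_cases hp : p ∈ tri
      · rw [if_pos hp, List.filter_cons_of_pos (by simpa using hp), List.flatMap_cons,
          PySem.Set.update_append]
      · rw [if_neg hp, List.filter_cons_of_neg (by simpa using hp)]

theorem pvB_keys (ts : List (List (List Int)))
    (pn : PySem.Dict (List Int) (PySem.Set (List Int))) :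
    (ts.foldl pvAddTriangle pn).keys = PySem.Set.update pn.keys ts.flatten := by
  induction ts generalizing pn with
  | nil => rfl
  | cons tri t ih =>
      rw [List.foldl_cons, ih, pvB_step_keys, List.flatten_cons, PySem.Set.update_append]

theorem pvB_eq_model (ts : List (List (List Int))) : find_point_neighbors_alt ts = pvModel ts := by
  unfold find_point_neighbors_alt
  have hkeys : (ts.foldl pvAddTriangle PySem.Dict.empty).keys = PySem.Set.ofList ts.flatten := by
    rw [pvB_keys, PySem.Dict.keys_empty]
    exact PySem.Set.update_empty _
  have hknd : (ts.foldl pvAddTriangle PySem.Dict.empty).keys.Nodup := by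
    rw [hkeys]; exact PySem.Set.nodup_ofList _
  rw [PySem.Dict.items_eq_map_keys _ hknd PySem.Set.empty, hkeys]
  unfold pvModel
  apply List.map_congr_left
  intro p hp
  congr 1
  rw [pvB_val, PySem.Dict.getD_empty]
  exact PySem.Set.update_empty _

-- ===== VERDICT (by name: the statement is the Claim_ definition above) =====
theorem find_point_neighbors_spec : Claim_equal_find_point_neighbors := by
  intro ts _
  unfold Spec_find_point_neighbors
  rw [pvA_eq_model, pvB_eq_model]
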